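-- pv_equiv track=rewrite | github.com/Awhict/courses-projects | 课程作业/汇编语言与逆向工程/homework-2/decipher_affine.py | affine_transform
-- ===== SOURCE A (Python) =====
-- def affine_transform(input_str):
--     affine_table = '1234567890_ABCDEFGHIJKLMNOPQRSTUVWXYZ'
--     transformed_str = ""
--     signal = 0
--     for char in input_str:
--         if char in affine_table:
--             index = affine_table.index(char)
--             if signal % 2 == 0:
--                 transformed_index = (25 * (index - 18)) % 37
--             else:
--                 transformed_index = (24 * (index - 3)) % 37
--             transformed_char = affine_table[transformed_index]
--             transformed_str += transformed_char
--         else: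
--             transformed_str += char
--         signal += 1
--     return transformed_str
-- ===== SOURCE B (Python) =====
-- def affine_transform(input_str):
--     table = '1234567890_ABCDEFGHIJKLMNOPQRSTUVWXYZ'
--     even_map = {c: table[(25 * (i - 18)) % 37] for i, c in enumerate(table)}
--     odd_map = {c: table[(24 * (i - 3)) % 37] for i, c in enumerate(table)}
--     out = []
--     i = 0
--     n = len(input_str)
--     while i < n:
--         c = input_str[i]
--         out.append(even_map.get(c, c))
--         if i + 1 < n:
--             d = input_str[i + 1]
--             out.append(odd_map.get(d, d))
--         i += 2
--     return ''.join(out)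
-- ===== Notes on version B (the rewrite author's own statement) =====
-- stated objective: alternative
-- what changed: B precomputes two 37-entry substitution dictionaries (even/odd position) instead of scanning the alphabet with .index per character, and consumes the input two characters per loop step instead of tracking a running parity counter.
import Mathlib
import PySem

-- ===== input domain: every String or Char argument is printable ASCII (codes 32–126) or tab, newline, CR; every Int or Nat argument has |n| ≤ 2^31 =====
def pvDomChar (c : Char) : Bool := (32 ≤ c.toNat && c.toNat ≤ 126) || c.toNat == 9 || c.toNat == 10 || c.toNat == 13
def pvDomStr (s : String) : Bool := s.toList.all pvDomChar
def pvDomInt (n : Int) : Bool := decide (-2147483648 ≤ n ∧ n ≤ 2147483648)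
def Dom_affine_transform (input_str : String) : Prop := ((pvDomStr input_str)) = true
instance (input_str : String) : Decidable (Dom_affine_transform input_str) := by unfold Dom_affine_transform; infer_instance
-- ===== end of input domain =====

-- B replaces A's per-character alphabet scan with a running signal counter by two precomputed
-- substitution dictionaries and a two-characters-per-step loop (a different decomposition).

def pvTableL : List Char := "1234567890_ABCDEFGHIJKLMNOPQRSTUVWXYZ".toList

-- ===== PORT A =====
-- A's per-iteration body: '.index' is guarded by the 'in' test, so the getD 0 default is never used
def aChar (signal : Int) (c : Char) : Char :=
  if pvTableL.contains c then
    let index : Int := ((PySem.List.index? pvTableL c).getD 0 : Nat)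
    let ti : Int :=
      if PySem.Int.mod signal 2 = 0 then PySem.Int.mod (25 * (index - 18)) 37
      else PySem.Int.mod (24 * (index - 3)) 37
    PySem.List.pyGetD pvTableL ti c
  else c

-- the for-loop: accumulator transformed_str (built as a List Char) and the running signal
def aLoop : List Char → Int → List Char → List Char
  | [], _, acc => acc
  | c :: cs, signal, acc => aLoop cs (signal + 1) (acc ++ [aChar signal c])

def affine_transform (input_str : String) : String :=
  String.ofList (aLoop input_str.toList 0 [])

-- ===== PORT B =====
-- the two dict comprehensions over enumerate(table)
def pvEvenMap : PySem.Dict Char Char :=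
  PySem.Dict.ofList ((PySem.List.enumerate pvTableL).map
    (fun p => (p.2, PySem.List.pyGetD pvTableL (PySem.Int.mod (25 * (p.1 - 18)) 37) '?')))

def pvOddMap : PySem.Dict Char Char :=
  PySem.Dict.ofList ((PySem.List.enumerate pvTableL).map
    (fun p => (p.2, PySem.List.pyGetD pvTableL (PySem.Int.mod (24 * (p.1 - 3)) 37) '?')))

-- m.get(c, c)
def bApply (m : PySem.Dict Char Char) (c : Char) : Char := (m.get? c).getD c

-- the 'while i < n' loop stepping by 2, ported as two-at-a-time structural recursion (exact)
def bLoop : List Char → List Char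
  | [] => []
  | [c] => [bApply pvEvenMap c]
  | c :: d :: rest => bApply pvEvenMap c :: bApply pvOddMap d :: bLoop rest

def affine_transform_alt (input_str : String) : String :=
  String.ofList (bLoop input_str.toList)

-- ===== PRECONDITION & SPEC =====
def Spec_affine_transform (input_str : String) (out : String) : Prop := out = affine_transform_alt input_str
instance (input_str : String) (out : String) : Decidable (Spec_affine_transform input_str out) := by unfold Spec_affine_transform; infer_instance

-- ===== CLAIM (what is proved, stated in full; the proofs are below) =====
def Claim_equal_affine_transform : Prop := ∀ (input_str : String), Dom_affine_transform input_str → Spec_affine_transform input_str (affine_transform input_str)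

-- ===== LEMMAS AND PROOFS =====

lemma pvTableL_eq : pvTableL = ['1', '2', '3', '4', '5', '6', '7', '8', '9', '0', '_', 'A', 'B', 'C', 'D', 'E', 'F', 'G', 'H', 'I', 'J', 'K', 'L', 'M', 'N', 'O', 'P', 'Q', 'R', 'S', 'T', 'U', 'V', 'W', 'X', 'Y', 'Z'] := rfl

set_option maxRecDepth 8000 in
lemma aChar_even (sig : Int) (c : Char) (h : PySem.Int.mod sig 2 = 0) :
    aChar sig c = bApply pvEvenMap c := by
  by_cases hc : pvTableL.contains c
  · have hmem : c ∈ pvTableL := by simpa using hc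
    simp only [aChar]
    rw [if_pos hc, if_pos h]
    rw [pvTableL_eq] at hmem
    fin_cases hmem <;> decide
  · have hmem : c ∉ pvTableL := by simpa using hc
    have hkeys : pvEvenMap.keys = pvTableL := by decide
    have hnone : pvEvenMap.get? c = none := by
      rw [PySem.Dict.get?_eq_none_iff_not_mem_keys, hkeys]; exact hmem
    simp only [aChar]
    rw [if_neg hc]
    simp [bApply, hnone]

set_option maxRecDepth 8000 in
lemma aChar_odd (sig : Int) (c : Char) (h : ¬ PySem.Int.mod sig 2 = 0) :
    aChar sig c = bApply pvOddMap c := by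
  by_cases hc : pvTableL.contains c
  · have hmem : c ∈ pvTableL := by simpa using hc
    simp only [aChar]
    rw [if_pos hc, if_neg h]
    rw [pvTableL_eq] at hmem
    fin_cases hmem <;> decide
  · have hmem : c ∉ pvTableL := by simpa using hc
    have hkeys : pvOddMap.keys = pvTableL := by decide
    have hnone : pvOddMap.get? c = none := by
      rw [PySem.Dict.get?_eq_none_iff_not_mem_keys, hkeys]; exact hmem
    simp only [aChar]
    rw [if_neg hc]
    simp [bApply, hnone]

lemma mod2_succ (sig : Int) (h : PySem.Int.mod sig 2 = 0) : ¬ PySem.Int.mod (sig + 1) 2 = 0 := by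
  rw [PySem.Int.mod_eq_emod_of_pos (by norm_num : (0:Int) < 2)] at h ⊢; omega

lemma mod2_succ_succ (sig : Int) (h : PySem.Int.mod sig 2 = 0) :
    PySem.Int.mod (sig + 1 + 1) 2 = 0 := by
  rw [PySem.Int.mod_eq_emod_of_pos (by norm_num : (0:Int) < 2)] at h ⊢; omega

lemma aLoop_eq_bLoop (cs : List Char) : ∀ (sig : Int) (acc : List Char),
    PySem.Int.mod sig 2 = 0 → aLoop cs sig acc = acc ++ bLoop cs := by
  induction cs using bLoop.induct with
  | case1 => intro sig acc _; simp [aLoop, bLoop]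
  | case2 c => intro sig acc h; simp [aLoop, bLoop, aChar_even sig c h]
  | case3 c d rest ih =>
    intro sig acc h
    simp only [aLoop, bLoop]
    rw [ih (sig + 1 + 1) _ (mod2_succ_succ sig h)]
    simp [aChar_even sig c h, aChar_odd (sig + 1) d (mod2_succ sig h)]

-- ===== VERDICT (by name: the statement is the Claim_ definition above) =====
theorem affine_transform_spec : Claim_equal_affine_transform := by
  intro s _
  unfold Spec_affine_transform affine_transform affine_transform_alt
  rw [aLoop_eq_bLoop s.toList 0 [] (by decide)]
  rfl
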